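-- pv_equiv track=rewrite | github.com/Zranshi/suda-problem | src/2010/3.按照奇偶重新排列/main.py | com_even_odd
-- ===== SOURCE A (Python) =====
-- from typing import List
--
-- def com_even_odd(arr: List[int]) -> List[int]:
--     """
--     让所有的偶数位于数组的偶数下标上, 或者所有奇数位于数组的奇数下标上.
--
--     由于一个整数必定是偶数或是奇数, 因此只需要让偶数/奇数其中一个排列正确, 则能保证满足题意.
--     因此我选择修改偶数下标, 用两个指针分别指向了偶数下标和奇数下标, 并不断找到不符合题意的元
--     素, 然后交换. 直到两个指针的其中一者超过属猪边界.
--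
--
--     Args:
--         arr (List[int]): 数组
--
--     Returns:
--         List[int]: 重新排列后的数组
--     """
--     even, idx = 0, 1
--     while even < len(arr) and idx < len(arr):
--         while even < len(arr) and not arr[even] % 2:
--             even += 2
--
--         while idx < len(arr) and arr[idx] % 2:
--             idx += 2
--
--         if idx < len(arr) and even < len(arr):
--             arr[idx], arr[even] = arr[even], arr[idx]
--     return arr
-- ===== SOURCE B (Python) =====
-- from typing import List
--
-- def com_even_odd(arr: List[int]) -> List[int]:
--     # Build the misplacement tables up front from the original array, then do
--     # one pairwise swap pass (zip truncates at the shorter table). Mutates arr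
--     # in place like the original.
--     P = [i for i, v in enumerate(arr) if i % 2 == 0 and v % 2 != 0]
--     Q = [i for i, v in enumerate(arr) if i % 2 == 1 and v % 2 == 0]
--     for p, q in zip(P, Q):
--         arr[p], arr[q] = arr[q], arr[p]
--     return arr
-- ===== Notes on version B (the rewrite author's own statement) =====
-- stated objective: alternative
-- what changed: Replaces the two interleaved advancing while-pointers with two up-front index-table passes (even indices holding odd values, odd indices holding even values) followed by a single zip-and-swap pass.
import Mathlib
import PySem

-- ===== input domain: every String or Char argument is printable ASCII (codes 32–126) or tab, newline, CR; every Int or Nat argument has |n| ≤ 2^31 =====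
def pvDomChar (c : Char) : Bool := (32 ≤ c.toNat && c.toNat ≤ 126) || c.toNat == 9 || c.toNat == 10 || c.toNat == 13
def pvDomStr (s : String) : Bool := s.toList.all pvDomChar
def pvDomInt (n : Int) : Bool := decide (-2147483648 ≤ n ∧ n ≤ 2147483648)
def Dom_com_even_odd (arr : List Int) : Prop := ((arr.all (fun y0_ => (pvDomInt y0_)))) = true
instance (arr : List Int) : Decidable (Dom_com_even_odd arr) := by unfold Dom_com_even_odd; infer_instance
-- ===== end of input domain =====

-- B rebuilds A's swap sequence from two up-front index tables instead of two interleaved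
-- advancing pointers (objective: alternative decomposition, same cost). Both Pythons mutate
-- the list argument in place; the equivalence proved here is about the returned value.

-- ===== PORT A =====
-- inner 'while even < len(arr) and not arr[even] % 2: even += 2'
def comScanEven (arr : List Int) (even : Nat) : Nat :=
  if even < arr.length ∧ PySem.Int.mod (arr.getD even 0) 2 = 0 then
    comScanEven arr (even + 2)
  else even
termination_by arr.length - even

-- inner 'while idx < len(arr) and arr[idx] % 2: idx += 2'
def comScanIdx (arr : List Int) (idx : Nat) : Nat :=
  if idx < arr.length ∧ PySem.Int.mod (arr.getD idx 0) 2 ≠ 0 then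
    comScanIdx arr (idx + 2)
  else idx
termination_by arr.length - idx

-- 'arr[idx], arr[even] = arr[even], arr[idx]' (both reads happen before both writes)
def comSwapA (arr : List Int) (even idx : Nat) : List Int :=
  (arr.set idx (arr.getD even 0)).set even (arr.getD idx 0)

theorem comScanEven_ge (arr : List Int) (even : Nat) : even ≤ comScanEven arr even := by
  unfold comScanEven
  split
  · exact le_trans (by omega) (comScanEven_ge arr (even + 2))
  · exact le_rfl
termination_by arr.length - even

-- the outer while loop.  After a swap Python re-runs both inner scans from the unchanged
-- pointers; since the swap makes arr[even-pointer] even and arr[idx-pointer] odd, each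
-- re-scan's first '+= 2' step is guaranteed, so it is folded into the recursive call
-- (this is what makes the recursion terminate; the computed values are identical).
def comLoopA (arr : List Int) (even idx : Nat) : List Int :=
  if even < arr.length ∧ idx < arr.length then
    if comScanIdx arr idx < arr.length ∧ comScanEven arr even < arr.length then
      comLoopA (comSwapA arr (comScanEven arr even) (comScanIdx arr idx))
        (comScanEven arr even + 2) (comScanIdx arr idx + 2)
    else arr
  else arr
termination_by arr.length - even
decreasing_by
  simp only [comSwapA, List.length_set]
  have := comScanEven_ge arr even
  omega

def com_even_odd (arr : List Int) : List Int :=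
  comLoopA arr 0 1

-- ===== PORT B =====
-- 'P = [i for i, v in enumerate(arr) if i % 2 == 0 and v % 2 != 0]'
-- 'Q = [i for i, v in enumerate(arr) if i % 2 == 1 and v % 2 == 0]'
-- 'for p, q in zip(P, Q): arr[p], arr[q] = arr[q], arr[p]'
def com_even_odd_alt (arr : List Int) : List Int :=
  let P := ((PySem.List.enumerate arr 0).filter
    (fun iv => PySem.Int.mod iv.1 2 == 0 && PySem.Int.mod iv.2 2 != 0)).map (fun iv => iv.1)
  let Q := ((PySem.List.enumerate arr 0).filter
    (fun iv => PySem.Int.mod iv.1 2 == 1 && PySem.Int.mod iv.2 2 == 0)).map (fun iv => iv.1)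
  (P.zip Q).foldl
    (fun a pq =>
      PySem.List.pySetD (PySem.List.pySetD a pq.1 (PySem.List.pyGetD a pq.2 0)) pq.2
        (PySem.List.pyGetD a pq.1 0))
    arr

-- ===== PRECONDITION & SPEC =====
def Spec_com_even_odd (arr : List Int) (out : List Int) : Prop := out = com_even_odd_alt arr
instance (arr : List Int) (out : List Int) : Decidable (Spec_com_even_odd arr out) := by unfold Spec_com_even_odd; infer_instance

-- ===== CLAIM (what is proved, stated in full; the proofs are below) =====
def Claim_equal_com_even_odd : Prop := ∀ (arr : List Int), Dom_com_even_odd arr → Spec_com_even_odd arr (com_even_odd arr)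

-- ===== LEMMAS AND PROOFS =====

-- the canonical middle object: misplaced positions of parity (k % 2) at or beyond k
def comSuf (arr : List Int) (k : Nat) (tOdd : Bool) : List Nat :=
  (List.range arr.length).filter
    (fun j => decide (k ≤ j) && (j % 2 == k % 2) &&
      ((PySem.Int.mod (arr.getD j 0) 2 != 0) == tOdd))

-- Nat-level swap fold (what B's fold computes after the casts are peeled)
def comFoldN (arr : List Int) (l : List (Nat × Nat)) : List Int :=
  l.foldl (fun a pq => (a.set pq.1 (a.getD pq.2 0)).set pq.2 (a.getD pq.1 0)) arr

theorem comSuf_nil (arr : List Int) (k : Nat) (t : Bool) (h : arr.length ≤ k) :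
    comSuf arr k t = [] := by
  unfold comSuf
  rw [List.filter_eq_nil_iff]
  intro j hj
  simp only [List.mem_range] at hj
  simp only [Bool.and_eq_true, decide_eq_true_eq]
  omega

theorem comSuf_step (arr : List Int) (k : Nat) (t : Bool) (hk : k < arr.length) :
    comSuf arr k t =
      (if ((PySem.Int.mod (arr.getD k 0) 2 != 0) == t) then [k] else []) ++ comSuf arr (k + 2) t := by
  unfold comSuf
  obtain ⟨m, hm⟩ : ∃ m, arr.length = (k + 1) + m := ⟨arr.length - (k + 1), by omega⟩
  rw [hm, List.range_add, List.filter_append, List.filter_append, List.range_succ,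
    List.filter_append, List.filter_append]
  have h0 : ∀ (t' : Bool) k', k ≤ k' → (List.range k).filter
      (fun j => decide (k' ≤ j) && (j % 2 == k' % 2) &&
        ((PySem.Int.mod (arr.getD j 0) 2 != 0) == t')) = [] := by
    intro t' k' hk'
    rw [List.filter_eq_nil_iff]
    intro j hj
    simp only [List.mem_range] at hj
    simp only [Bool.and_eq_true, decide_eq_true_eq]
    omega
  rw [h0 t k (by omega), h0 t (k + 2) (by omega)]
  have hsingle : (List.filter
      (fun j => decide (k ≤ j) && (j % 2 == k % 2) &&
        ((PySem.Int.mod (arr.getD j 0) 2 != 0) == t)) [k]) =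
      (if ((PySem.Int.mod (arr.getD k 0) 2 != 0) == t) then [k] else []) := by
    rw [List.filter_singleton]
    have h1 : (decide (k ≤ k) && (k % 2 == k % 2)) = true := by simp
    rw [show (decide (k ≤ k) && (k % 2 == k % 2) && ((PySem.Int.mod (arr.getD k 0) 2 != 0) == t))
        = ((PySem.Int.mod (arr.getD k 0) 2 != 0) == t) by rw [h1, Bool.true_and],
      Bool.cond_eq_ite]
  have hsingle2 : (List.filter
      (fun j => decide (k + 2 ≤ j) && (j % 2 == (k + 2) % 2) &&
        ((PySem.Int.mod (arr.getD j 0) 2 != 0) == t)) [k]) = [] := by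
    rw [List.filter_singleton]
    have h1 : decide (k + 2 ≤ k) = false := by simp
    rw [h1, Bool.false_and, Bool.false_and, Bool.cond_false]
  rw [hsingle, hsingle2]
  simp only [List.nil_append, List.append_nil]
  congr 1
  rw [List.filter_map, List.filter_map]
  congr 1
  apply List.filter_congr
  intro j _
  simp only [Function.comp]
  by_cases hp : (k + 1 + j) % 2 = k % 2
  · have e1 : decide (k ≤ k + 1 + j) = true := decide_eq_true (by omega)
    have e2 : decide (k + 2 ≤ k + 1 + j) = true := decide_eq_true (by omega)
    have e3 : ((k + 1 + j) % 2 == k % 2) = true := beq_iff_eq.mpr hp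
    have e4 : ((k + 1 + j) % 2 == (k + 2) % 2) = true := beq_iff_eq.mpr (by omega)
    simp only [e1, e2, e3, e4]
  · have e3 : ((k + 1 + j) % 2 == k % 2) = false := beq_eq_false_iff_ne.mpr hp
    have e4 : ((k + 1 + j) % 2 == (k + 2) % 2) = false := beq_eq_false_iff_ne.mpr (by omega)
    simp only [e3, e4, Bool.and_false, Bool.false_and]

theorem comFoldN_cons (arr : List Int) (p : Nat × Nat) (l : List (Nat × Nat)) :
    comFoldN arr (p :: l) =
      comFoldN ((arr.set p.1 (arr.getD p.2 0)).set p.2 (arr.getD p.1 0)) l := rfl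

-- scan stop properties
theorem comScanEven_stop (arr : List Int) (even : Nat) :
    comScanEven arr even < arr.length →
      PySem.Int.mod (arr.getD (comScanEven arr even) 0) 2 ≠ 0 := by
  unfold comScanEven
  split
  · exact fun h => comScanEven_stop arr (even + 2) (by simpa using h)
  · rename_i h
    intro h1 h2
    exact h ⟨h1, h2⟩
termination_by arr.length - even

theorem comScanIdx_stop (arr : List Int) (idx : Nat) :
    comScanIdx arr idx < arr.length →
      PySem.Int.mod (arr.getD (comScanIdx arr idx) 0) 2 = 0 := by
  unfold comScanIdx
  split
  · exact fun h => comScanIdx_stop arr (idx + 2) (by simpa using h)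
  · rename_i h
    intro h1
    by_contra h2
    exact h ⟨h1, h2⟩
termination_by arr.length - idx

theorem comScanEven_parity (arr : List Int) (even : Nat) :
    comScanEven arr even % 2 = even % 2 := by
  unfold comScanEven
  split
  · rw [comScanEven_parity arr (even + 2)]; omega
  · rfl
termination_by arr.length - even

theorem comScanIdx_parity (arr : List Int) (idx : Nat) :
    comScanIdx arr idx % 2 = idx % 2 := by
  unfold comScanIdx
  split
  · rw [comScanIdx_parity arr (idx + 2)]; omega
  · rfl
termination_by arr.length - idx

theorem comScanIdx_ge (arr : List Int) (idx : Nat) : idx ≤ comScanIdx arr idx := by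
  unfold comScanIdx
  split
  · exact le_trans (by omega) (comScanIdx_ge arr (idx + 2))
  · exact le_rfl
termination_by arr.length - idx

-- scanning skips exactly the positions the suffix filter rejects
theorem comSuf_scanEven (arr : List Int) (even : Nat) :
    comSuf arr even true = comSuf arr (comScanEven arr even) true := by
  unfold comScanEven
  split
  · rename_i h
    rw [comSuf_step arr even true h.1, ← comSuf_scanEven arr (even + 2)]
    have hb : (PySem.Int.mod (arr.getD even 0) 2 != 0) = false := by
      rw [h.2]; decide
    rw [hb, if_neg (by decide), List.nil_append]
  · rfl
termination_by arr.length - even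

theorem comSuf_scanIdx (arr : List Int) (idx : Nat) :
    comSuf arr idx false = comSuf arr (comScanIdx arr idx) false := by
  unfold comScanIdx
  split
  · rename_i h
    rw [comSuf_step arr idx false h.1, ← comSuf_scanIdx arr (idx + 2)]
    have hb : (PySem.Int.mod (arr.getD idx 0) 2 != 0) = true := bne_iff_ne.mpr h.2
    rw [hb, if_neg (by decide), List.nil_append]
  · rfl
termination_by arr.length - idx

-- a swap at two positions each either below k or of the other parity leaves the suffix table alone
theorem comSuf_swap (arr : List Int) (k p q : Nat) (t : Bool)
    (hp : p < k ∨ p % 2 ≠ k % 2) (hq : q < k ∨ q % 2 ≠ k % 2) :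
    comSuf ((arr.set q (arr.getD p 0)).set p (arr.getD q 0)) k t = comSuf arr k t := by
  unfold comSuf
  rw [List.length_set, List.length_set]
  apply List.filter_congr
  intro j hj
  simp only [List.mem_range] at hj
  by_cases hk : k ≤ j ∧ j % 2 = k % 2
  · have hjp : j ≠ p := by rcases hp with h | h <;> omega
    have hjq : j ≠ q := by rcases hq with h | h <;> omega
    have hval : ((arr.set q (arr.getD p 0)).set p (arr.getD q 0)).getD j 0 = arr.getD j 0 := by
      rw [List.getD_eq_getElem?_getD, List.getElem?_set_ne (by omega),
        List.getElem?_set_ne (by omega), ← List.getD_eq_getElem?_getD]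
    rw [hval]
  · have h1 : (decide (k ≤ j) && (j % 2 == k % 2)) = false := by
      rcases Decidable.not_and_iff_not_or_not.mp hk with h | h
      · rw [decide_eq_false h, Bool.false_and]
      · rw [beq_eq_false_iff_ne.mpr h, Bool.and_false]
    rw [h1, Bool.false_and, Bool.false_and]

-- the outer loop computes exactly the zip-of-tables swap fold
theorem comLoopA_eq_fold (arr : List Int) (even idx : Nat)
    (hpe : even % 2 = 0) (hpi : idx % 2 = 1) :
    comLoopA arr even idx = comFoldN arr ((comSuf arr even true).zip (comSuf arr idx false)) := by
  unfold comLoopA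
  split
  · rename_i hlen
    set e := comScanEven arr even with hedef
    set i := comScanIdx arr idx with hidef
    split
    · rename_i hin
      rw [comSuf_scanEven arr even, comSuf_scanIdx arr idx, ← hedef, ← hidef]
      have hodd : (PySem.Int.mod (arr.getD e 0) 2 != 0) = true :=
        bne_iff_ne.mpr (comScanEven_stop arr even hin.2)
      have hev : (PySem.Int.mod (arr.getD i 0) 2 != 0) = false := by
        rw [comScanIdx_stop arr idx hin.1]; decide
      rw [comSuf_step arr e true hin.2, comSuf_step arr i false hin.1, hodd, hev,
        if_pos (by decide), if_pos (by decide)]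
      simp only [List.singleton_append, List.zip_cons_cons, comFoldN_cons]
      have hpe' : e % 2 = 0 := by rw [hedef, comScanEven_parity]; exact hpe
      have hpi' : i % 2 = 1 := by rw [hidef, comScanIdx_parity]; exact hpi
      have hrec := comLoopA_eq_fold (comSwapA arr e i) (e + 2) (i + 2)
        (by omega) (by omega)
      rw [hrec]
      have hswap : comSwapA arr e i = (arr.set e (arr.getD i 0)).set i (arr.getD e 0) := by
        unfold comSwapA
        apply List.set_comm
        omega
      have hA : comSuf (comSwapA arr e i) (e + 2) true = comSuf arr (e + 2) true := by
        rw [hswap]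
        exact comSuf_swap arr (e + 2) i e true (Or.inr (by omega)) (Or.inl (by omega))
      have hB : comSuf (comSwapA arr e i) (i + 2) false = comSuf arr (i + 2) false := by
        unfold comSwapA
        exact comSuf_swap arr (i + 2) e i false (Or.inr (by omega)) (Or.inl (by omega))
      rw [hA, hB, hswap]
    · rename_i hin
      rw [comSuf_scanEven arr even, comSuf_scanIdx arr idx, ← hedef, ← hidef]
      rcases Nat.lt_or_ge i arr.length with hi | hi
      · have he : arr.length ≤ e := by
          rcases Nat.lt_or_ge e arr.length with h | h
          · exact absurd ⟨hi, h⟩ hin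
          · exact h
        rw [comSuf_nil arr e true he]
        rfl
      · rw [comSuf_nil arr i false hi, List.zip_nil_right]
        rfl
  · rename_i hlen
    rcases Nat.lt_or_ge even arr.length with h | h
    · have hidx : arr.length ≤ idx := by
        rcases Nat.lt_or_ge idx arr.length with h2 | h2
        · exact absurd ⟨h, h2⟩ hlen
        · exact h2
      rw [comSuf_nil arr idx false hidx, List.zip_nil_right]
      rfl
    · rw [comSuf_nil arr even true h]
      rfl
termination_by arr.length - even
decreasing_by
  simp only [comSwapA, List.length_set]
  have := comScanEven_ge arr even
  omega

-- B side: enumerate as an indexed range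
theorem com_enumerate_eq (arr : List Int) (s : Nat) :
    PySem.List.enumerate arr (s : Int) =
      (List.range arr.length).map (fun j => (((s + j : Nat) : Int), arr.getD j 0)) := by
  induction arr generalizing s with
  | nil => simp [PySem.List.enumerate_nil]
  | cons x xs ih =>
    rw [PySem.List.enumerate_cons]
    have hs : ((s : Int) + 1) = ((s + 1 : Nat) : Int) := by push_cast; ring
    rw [hs, ih (s + 1)]
    rw [List.length_cons, List.range_succ_eq_map, List.map_cons, List.map_map]
    have hhead : ((s : Int), x) =
        (fun j => (((s + j : Nat) : Int), (x :: xs).getD j 0)) 0 := by simp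
    have htail : List.map (fun j => (((s + 1 + j : Nat) : Int), xs.getD j 0))
          (List.range xs.length) =
        List.map ((fun j => (((s + j : Nat) : Int), (x :: xs).getD j 0)) ∘ Nat.succ)
          (List.range xs.length) := by
      apply List.map_congr_left
      intro j _
      simp only [Function.comp, List.getD_cons_succ, Prod.mk.injEq]
      refine ⟨?_, trivial⟩
      push_cast
      ring
    rw [hhead, htail]

theorem com_enumerate_zero (arr : List Int) :
    PySem.List.enumerate arr 0 =
      (List.range arr.length).map (fun (j : Nat) => ((j : Int), arr.getD j 0)) := by
  have h := com_enumerate_eq arr 0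
  simpa using h

-- B's comprehensions are the cast suffix tables
theorem com_alt_P (arr : List Int) :
    ((PySem.List.enumerate arr 0).filter
      (fun iv => PySem.Int.mod iv.1 2 == 0 && PySem.Int.mod iv.2 2 != 0)).map (fun iv => iv.1)
    = (comSuf arr 0 true).map (fun (j : Nat) => (j : Int)) := by
  rw [com_enumerate_zero, List.filter_map, List.map_map]
  unfold comSuf
  have hpred : ∀ j ∈ List.range arr.length,
      ((fun iv : Int × Int => PySem.Int.mod iv.1 2 == 0 && PySem.Int.mod iv.2 2 != 0) ∘
        (fun (j : Nat) => ((j : Int), arr.getD j 0))) j =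
      (decide (0 ≤ j) && (j % 2 == 0 % 2) &&
        ((PySem.Int.mod (arr.getD j 0) 2 != 0) == true)) := by
    intro j _
    simp only [Function.comp]
    have hm : PySem.Int.mod (j : Int) 2 = ((j % 2 : Nat) : Int) := by
      exact_mod_cast PySem.Int.mod_natCast j 2
    have e0 : decide (0 ≤ j) = true := by simp
    rcases Nat.mod_two_eq_zero_or_one j with h | h
    · have e1 : (PySem.Int.mod (j : Int) 2 == (0 : Int)) = true := by
        rw [hm, h]; decide
      have e2 : ((j % 2 : Nat) == 0 % 2) = true := by rw [h]; decide
      rw [e1, e2, e0]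
      simp only [Bool.true_and]
      rcases Bool.eq_false_or_eq_true (PySem.Int.mod (arr.getD j 0) 2 != 0) with hY | hY <;>
        rw [hY] <;> rfl
    · have e1 : (PySem.Int.mod (j : Int) 2 == (0 : Int)) = false := by
        rw [hm, h]; decide
      have e2 : ((j % 2 : Nat) == 0 % 2) = false := by rw [h]; decide
      rw [e1, e2]
      simp only [Bool.false_and, Bool.and_false]
  rw [List.filter_congr hpred]
  exact List.map_congr_left fun j _ => rfl

theorem com_alt_Q (arr : List Int) :
    ((PySem.List.enumerate arr 0).filter
      (fun iv => PySem.Int.mod iv.1 2 == 1 && PySem.Int.mod iv.2 2 == 0)).map (fun iv => iv.1)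
    = (comSuf arr 1 false).map (fun (j : Nat) => (j : Int)) := by
  rw [com_enumerate_zero, List.filter_map, List.map_map]
  unfold comSuf
  have hpred : ∀ j ∈ List.range arr.length,
      ((fun iv : Int × Int => PySem.Int.mod iv.1 2 == 1 && PySem.Int.mod iv.2 2 == 0) ∘
        (fun (j : Nat) => ((j : Int), arr.getD j 0))) j =
      (decide (1 ≤ j) && (j % 2 == 1 % 2) &&
        ((PySem.Int.mod (arr.getD j 0) 2 != 0) == false)) := by
    intro j _
    simp only [Function.comp]
    have hm : PySem.Int.mod (j : Int) 2 = ((j % 2 : Nat) : Int) := by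
      exact_mod_cast PySem.Int.mod_natCast j 2
    rcases Nat.mod_two_eq_zero_or_one j with h | h
    · have e1 : (PySem.Int.mod (j : Int) 2 == (1 : Int)) = false := by
        rw [hm, h]; decide
      have e2 : ((j % 2 : Nat) == 1 % 2) = false := by rw [h]; decide
      rw [e1, e2]
      simp only [Bool.false_and, Bool.and_false]
    · have e1 : (PySem.Int.mod (j : Int) 2 == (1 : Int)) = true := by
        rw [hm, h]; decide
      have e2 : ((j % 2 : Nat) == 1 % 2) = true := by rw [h]; decide
      have e0 : decide (1 ≤ j) = true := decide_eq_true (by omega)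
      rw [e1, e2, e0]
      simp only [Bool.true_and, bne]
      rcases Bool.eq_false_or_eq_true (PySem.Int.mod (arr.getD j 0) 2 == 0) with hY | hY <;>
        rw [hY] <;> rfl
  rw [List.filter_congr hpred]
  exact List.map_congr_left fun j _ => rfl

-- peel the Int casts off B's fold
theorem com_alt_eq_fold (arr : List Int) :
    com_even_odd_alt arr = comFoldN arr ((comSuf arr 0 true).zip (comSuf arr 1 false)) := by
  simp only [com_even_odd_alt]
  rw [com_alt_P, com_alt_Q, List.zip_map, List.foldl_map]
  simp only [Prod.map_fst, Prod.map_snd, PySem.List.pySetD_natCast, PySem.List.pyGetD_natCast]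
  rfl

-- ===== VERDICT (by name: the statement is the Claim_ definition above) =====
theorem com_even_odd_spec : Claim_equal_com_even_odd := by
  intro arr _
  unfold Spec_com_even_odd
  unfold com_even_odd
  rw [comLoopA_eq_fold arr 0 1 rfl rfl, com_alt_eq_fold]
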